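-- pv_equiv track=rewrite | github.com/Chopemon/Willowcreek | neighborhoods.py | get_address_for_household
-- ===== SOURCE A (Python) =====
-- from typing import Dict, Optional
--
-- NEIGHBORHOODS: Dict[str, Dict[str, str]] = {
--     # Malcolm + Sturm + Tessa live on the same street
--     "Oak Street": {
--         "Malcolm's House": "Oak Street 1",
--         "Sturm House": "Oak Street 3",
--         "Tessa's House": "Oak Street 5",
--     },
--
--     # Carter / Thompson / Lockheart cluster
--     "Willow Lane": {
--         "Carter House": "Willow Lane 2",
--         "Thompson House": "Willow Lane 4",
--         "Lockheart House": "Willow Lane 6",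
--     },
--
--     # Riverside family homes
--     "Riverside Loop": {
--         "Blake House": "Riverside Loop 10",
--         "Kallio House": "Riverside Loop 12",
--     },
--
--     # Paired houses further out
--     "Sycamore Lane": {
--         "Seinfeld House": "Sycamore Lane 8",
--         "Kunitz House": "Sycamore Lane 10",
--     },
--
--     # New neighborhood you added for Isabella & Lucas
--     "Cedar View": {
--         "Ruiz House": "Cedar View 1",
--     },
--
--     # Nate lives outside the town proper
--     "Out-of-Town": {
--         "Nate's House": "County Road 5 (Out of Town)",
--     },
-- }
--
-- def get_address_for_household(household: Optional[str]) -> Optional[str]: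
--     """
--     Return the full street address (e.g. 'Oak Street 3') for a household,
--     or None if we don't have it registered.
--     """
--     if not household:
--         return None
--
--     for hood, houses in NEIGHBORHOODS.items():
--         addr = houses.get(household)
--         if addr:
--             return addr
--
--     return None
-- ===== SOURCE B (Python) =====
-- from typing import Optional
--
-- # One flat household -> address table; neighborhood grouping is irrelevant to lookup.
-- ADDRESSES = {
--     "Malcolm's House": "Oak Street 1",
--     "Sturm House": "Oak Street 3",
--     "Tessa's House": "Oak Street 5",
--     "Carter House": "Willow Lane 2",
--     "Thompson House": "Willow Lane 4",
--     "Lockheart House": "Willow Lane 6",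
--     "Blake House": "Riverside Loop 10",
--     "Kallio House": "Riverside Loop 12",
--     "Seinfeld House": "Sycamore Lane 8",
--     "Kunitz House": "Sycamore Lane 10",
--     "Nate's House": "County Road 5 (Out of Town)",
--     "Ruiz House": "Cedar View 1",
-- }
--
-- def get_address_for_household(household: Optional[str]) -> Optional[str]:
--     if not household:
--         return None
--     return ADDRESSES.get(household)
-- ===== Notes on version B (the rewrite author's own statement) =====
-- stated objective: simpler
-- what changed: Replaces the loop over nested neighborhood dicts with a single lookup in one flat household->address table, dropping the neighborhood grouping and the per-dict truthiness check entirely.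
import Mathlib
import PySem

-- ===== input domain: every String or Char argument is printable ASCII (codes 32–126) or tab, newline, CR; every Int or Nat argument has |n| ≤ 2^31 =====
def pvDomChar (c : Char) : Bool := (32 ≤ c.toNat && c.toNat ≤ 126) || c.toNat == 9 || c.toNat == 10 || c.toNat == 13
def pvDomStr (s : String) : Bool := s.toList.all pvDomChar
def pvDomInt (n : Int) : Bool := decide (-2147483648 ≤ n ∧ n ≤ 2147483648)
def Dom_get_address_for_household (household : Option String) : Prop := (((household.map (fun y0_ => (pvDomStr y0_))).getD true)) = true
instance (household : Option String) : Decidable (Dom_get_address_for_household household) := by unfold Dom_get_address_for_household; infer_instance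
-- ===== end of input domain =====

-- B replaces A's scan over nested neighborhood dicts with a single flat-dict lookup (simpler; same return values).


-- ===== PORT A =====
-- Faithful port of A: iterate over the neighborhoods (in insertion order), probing each
-- inner dict; a found, truthy (nonempty) address is returned at once.
def pvNeighborhoods : List (String × PySem.Dict String String) :=
  [("Oak Street", PySem.Dict.mk [("Malcolm's House", "Oak Street 1"), ("Sturm House", "Oak Street 3"), ("Tessa's House", "Oak Street 5")]),
  ("Willow Lane", PySem.Dict.mk [("Carter House", "Willow Lane 2"), ("Thompson House", "Willow Lane 4"), ("Lockheart House", "Willow Lane 6")]),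
  ("Riverside Loop", PySem.Dict.mk [("Blake House", "Riverside Loop 10"), ("Kallio House", "Riverside Loop 12")]),
  ("Sycamore Lane", PySem.Dict.mk [("Seinfeld House", "Sycamore Lane 8"), ("Kunitz House", "Sycamore Lane 10")]),
  ("Cedar View", PySem.Dict.mk [("Ruiz House", "Cedar View 1")]),
  ("Out-of-Town", PySem.Dict.mk [("Nate's House", "County Road 5 (Out of Town)")])]

def pvLoopA : List (String × PySem.Dict String String) → String → Option String
  | [], _ => none
  | (_, houses) :: rest, h =>
    match PySem.Dict.get? houses h with
    | some addr => if addr ≠ "" then some addr else pvLoopA rest h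
    | none => pvLoopA rest h

def get_address_for_household (household : Option String) : Option String :=
  match household with
  | none => none
  | some h => if h = "" then none else pvLoopA pvNeighborhoods h

-- ===== PORT B =====
-- Port of B: one flat household -> address dict, single lookup.
def pvAddresses : PySem.Dict String String :=
  PySem.Dict.mk [("Malcolm's House", "Oak Street 1"), ("Sturm House", "Oak Street 3"), ("Tessa's House", "Oak Street 5"), ("Carter House", "Willow Lane 2"), ("Thompson House", "Willow Lane 4"), ("Lockheart House", "Willow Lane 6"), ("Blake House", "Riverside Loop 10"), ("Kallio House", "Riverside Loop 12"), ("Seinfeld House", "Sycamore Lane 8"), ("Kunitz House", "Sycamore Lane 10"), ("Nate's House", "County Road 5 (Out of Town)"), ("Ruiz House", "Cedar View 1")]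

def get_address_for_household_alt (household : Option String) : Option String :=
  match household with
  | none => none
  | some h => if h = "" then none else pvAddresses.get? h

-- ===== PRECONDITION & SPEC =====
def Spec_get_address_for_household (household : Option String) (out : Option String) : Prop := out = get_address_for_household_alt household
instance (household : Option String) (out : Option String) : Decidable (Spec_get_address_for_household household out) := by unfold Spec_get_address_for_household; infer_instance

-- ===== CLAIM (what is proved, stated in full; the proofs are below) =====
def Claim_equal_get_address_for_household : Prop := ∀ (household : Option String), Dom_get_address_for_household household → Spec_get_address_for_household household (get_address_for_household household)

-- ===== LEMMAS AND PROOFS =====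

-- ===== VERDICT (by name: the statement is the Claim_ definition above) =====
theorem get_address_for_household_spec : Claim_equal_get_address_for_household := by
  intro household _
  unfold Spec_get_address_for_household
  cases household with
  | none => rfl
  | some h =>
    simp only [get_address_for_household, get_address_for_household_alt]
    by_cases hh : h = ""
    · simp [hh]
    · simp only [if_neg hh]
      by_cases h1 : h = "Malcolm's House"
      · subst h1; decide
      by_cases h2 : h = "Sturm House"
      · subst h2; decide
      by_cases h3 : h = "Tessa's House"
      · subst h3; decide
      by_cases h4 : h = "Carter House"
      · subst h4; decide
      by_cases h5 : h = "Thompson House"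
      · subst h5; decide
      by_cases h6 : h = "Lockheart House"
      · subst h6; decide
      by_cases h7 : h = "Blake House"
      · subst h7; decide
      by_cases h8 : h = "Kallio House"
      · subst h8; decide
      by_cases h9 : h = "Seinfeld House"
      · subst h9; decide
      by_cases h10 : h = "Kunitz House"
      · subst h10; decide
      by_cases h11 : h = "Nate's House"
      · subst h11; decide
      by_cases h12 : h = "Ruiz House"
      · subst h12; decide
      simp only [pvLoopA, pvNeighborhoods, pvAddresses, PySem.Dict.get?_mk_cons]
      simp [PySem.Dict.get?, List.find?, beq_eq_false_iff_ne.mpr (Ne.symm h1), beq_eq_false_iff_ne.mpr (Ne.symm h2), beq_eq_false_iff_ne.mpr (Ne.symm h3), beq_eq_false_iff_ne.mpr (Ne.symm h4), beq_eq_false_iff_ne.mpr (Ne.symm h5), beq_eq_false_iff_ne.mpr (Ne.symm h6), beq_eq_false_iff_ne.mpr (Ne.symm h7), beq_eq_false_iff_ne.mpr (Ne.symm h8), beq_eq_false_iff_ne.mpr (Ne.symm h9), beq_eq_false_iff_ne.mpr (Ne.symm h10), beq_eq_false_iff_ne.mpr (Ne.symm h11), beq_eq_false_iff_ne.mpr (Ne.symm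 h12)]
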